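-- pv_equiv track=rewrite | github.com/Arsen1302/Code-copy-detector | TestData/solutions/problem_1704_4.py | solution_1704_4
-- ===== SOURCE A (Python) =====
-- from typing import List
--
-- def solution_1704_4(nums: List[int], space: int) -> int:
--     d = dict()
--     for n in nums:
--         rem = n % space
--         if rem in d:
--             if n < d[rem][1]:
--                 d[rem][1] = n
--             d[rem][0] -= 1
--         else:
--             d[rem] = [-1, n]
--     return min(d.values())[1]
-- ===== SOURCE B (Python) =====
-- from typing import List
--
-- def solution_1704_4(nums: List[int], space: int) -> int:
--     best = None
--     for n in nums:
--         cls = [m for m in nums if m % space == n % space]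
--         key = (-len(cls), min(cls))
--         if best is None or key < best:
--             best = key
--     return best[1]
-- ===== Notes on version B (the rewrite author's own statement) =====
-- stated objective: simpler
-- what changed: B drops A's dict of incrementally maintained (-count, running-min) aggregates entirely: for each element it recomputes its whole residue class by a nested filter over nums and keeps the lexicographically smallest (-size, min) key, returning its second component.
import Mathlib
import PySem

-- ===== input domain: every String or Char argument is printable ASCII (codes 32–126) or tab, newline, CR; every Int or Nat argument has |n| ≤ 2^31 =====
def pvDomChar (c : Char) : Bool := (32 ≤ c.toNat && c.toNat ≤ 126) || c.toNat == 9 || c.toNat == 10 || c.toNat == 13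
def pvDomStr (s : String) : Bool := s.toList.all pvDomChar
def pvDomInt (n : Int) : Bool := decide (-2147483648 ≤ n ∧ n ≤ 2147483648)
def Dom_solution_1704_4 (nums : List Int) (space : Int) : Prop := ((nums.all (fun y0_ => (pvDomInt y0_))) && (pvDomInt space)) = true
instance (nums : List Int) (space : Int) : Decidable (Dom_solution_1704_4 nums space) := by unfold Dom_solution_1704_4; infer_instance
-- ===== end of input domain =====

-- B drops A's dict of incremental (-count, running-min) aggregates: it brute-force recomputes each
-- element's residue class by a nested filter and keeps the lexicographically least (-size, min) key; objective: simpler.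

-- ===== PORT A =====
def stepA (space : Int) (d : PySem.Dict Int (Int × Int)) (n : Int) : PySem.Dict Int (Int × Int) :=
  match d.get? (PySem.Int.mod n space) with
  | some p => d.insert (PySem.Int.mod n space) (p.1 - 1, if n < p.2 then n else p.2)
  | none => d.insert (PySem.Int.mod n space) (-1, n)

def solution_1704_4 (nums : List Int) (space : Int) : Int :=
  let d := nums.foldl (stepA space) PySem.Dict.empty
  match PySem.List.min2? d.values (fun p => p.1) (fun p => p.2) with
  | some p => p.2
  | none => 0   -- never taken under Pre_ (nums ≠ []); Python's min([]) raises ValueError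

-- ===== PORT B =====
-- min(cls); cls is always nonempty (it contains n), so the getD 0 default is never taken
def minL (l : List Int) : Int := (PySem.List.min? l (fun x => x)).getD 0

-- key = (-len(cls), min(cls)) for the residue class of n
def clsKey (nums : List Int) (space : Int) (n : Int) : Int × Int :=
  let cls := nums.filter (fun m => PySem.Int.mod m space == PySem.Int.mod n space)
  (-(cls.length : Int), minL cls)

-- 'if best is None or key < best: best = key'  (Python tuple < is lexicographic)
def updB (b : Option (Int × Int)) (k : Int × Int) : Option (Int × Int) :=
  match b with
  | none => some k
  | some b => if k.1 < b.1 ∨ (k.1 = b.1 ∧ k.2 < b.2) then some k else some b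

def solution_1704_4_alt (nums : List Int) (space : Int) : Int :=
  match nums.foldl (fun b n => updB b (clsKey nums space n)) none with
  | some b => b.2
  | none => 0   -- never taken under Pre_ (nums ≠ []); Python B's best[1] on None raises

-- ===== PRECONDITION & SPEC =====
-- Pre_ excludes exactly the raising inputs: space = 0 (ZeroDivisionError in n % space)
-- and nums = [] (A's min() of an empty sequence raises ValueError, B's best stays None).
def Pre_solution_1704_4 (nums : List Int) (space : Int) : Prop := nums ≠ [] ∧ space ≠ 0
instance (nums : List Int) (space : Int) : Decidable (Pre_solution_1704_4 nums space) := by unfold Pre_solution_1704_4; infer_instance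
def pvWitness_solution_1704_4 : List Int × Int := ([3, 1, 4, 7, 6], 2)

def Spec_solution_1704_4 (nums : List Int) (space : Int) (out : Int) : Prop := out = solution_1704_4_alt nums space
instance (nums : List Int) (space : Int) (out : Int) : Decidable (Spec_solution_1704_4 nums space out) := by unfold Spec_solution_1704_4; infer_instance

-- ===== CLAIM (what is proved, stated in full; the proofs are below) =====
def Claim_equal_solution_1704_4 : Prop := ∀ (nums : List Int) (space : Int), Dom_solution_1704_4 nums space → Pre_solution_1704_4 nums space → Spec_solution_1704_4 nums space (solution_1704_4 nums space)

-- ===== LEMMAS AND PROOFS =====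

-- the residue class of r inside l, and its (-count, min) key
def flt (space : Int) (l : List Int) (r : Int) : List Int :=
  l.filter (fun m => PySem.Int.mod m space == r)

def keyOf (space : Int) (l : List Int) (r : Int) : Int × Int :=
  (-((flt space l r).length : Int), minL (flt space l r))

-- distinct remainders of l in first-occurrence order (= A's dict key order)
def occStep (space : Int) (acc : List Int) (n : Int) : List Int :=
  if PySem.Int.mod n space ∈ acc then acc else acc ++ [PySem.Int.mod n space]

def occs (space : Int) (l : List Int) : List Int := l.foldl (occStep space) []

lemma occs_append_singleton (space : Int) (l : List Int) (n : Int) :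
    occs space (l ++ [n]) = occStep space (occs space l) n := by
  simp [occs, List.foldl_append]

lemma mem_foldl_occStep (space : Int) (l : List Int) (acc : List Int) (r : Int) :
    r ∈ l.foldl (occStep space) acc ↔ r ∈ acc ∨ ∃ m ∈ l, PySem.Int.mod m space = r := by
  induction l generalizing acc with
  | nil => simp
  | cons n t ih =>
    rw [List.foldl_cons, ih]
    have hstep : r ∈ occStep space acc n ↔ r ∈ acc ∨ PySem.Int.mod n space = r := by
      unfold occStep
      split
      · next h => exact ⟨Or.inl, fun hr => hr.elim id (fun e => e ▸ h)⟩
      · simp [or_comm, eq_comm]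
    rw [hstep]
    constructor
    · rintro ((h | h) | ⟨m, hm, hr⟩)
      · exact Or.inl h
      · exact Or.inr ⟨n, by simp, h⟩
      · exact Or.inr ⟨m, by simp [hm], hr⟩
    · rintro (h | ⟨m, hm, hr⟩)
      · exact Or.inl (Or.inl h)
      · rcases List.mem_cons.mp hm with rfl | hm
        · exact Or.inl (Or.inr hr)
        · exact Or.inr ⟨m, hm, hr⟩

lemma occs_mem (space : Int) (l : List Int) (r : Int) :
    r ∈ occs space l ↔ ∃ m ∈ l, PySem.Int.mod m space = r := by
  rw [occs, mem_foldl_occStep]; simp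

-- lookups in a dict whose items are rs.map (fun r => (r, g r))
lemma get?_mk_map (rs : List Int) (g : Int → Int × Int) (x : Int) :
    (PySem.Dict.mk (rs.map (fun r => (r, g r)))).get? x = if x ∈ rs then some (g x) else none := by
  induction rs with
  | nil => simp [PySem.Dict.get?]
  | cons r t ih =>
    rw [List.map_cons, PySem.Dict.get?_mk_cons, ih]
    by_cases hr : r = x
    · subst hr; simp
    · simp [hr, Ne.symm hr]

lemma contains_mk_map (rs : List Int) (g : Int → Int × Int) (x : Int) :
    (PySem.Dict.mk (rs.map (fun r => (r, g r)))).contains x = decide (x ∈ rs) := by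
  rw [PySem.Dict.contains_eq_isSome_get?, get?_mk_map]
  by_cases hx : x ∈ rs <;> simp [hx]

lemma minL_append_singleton (l : List Int) (hl : l ≠ []) (n : Int) :
    minL (l ++ [n]) = if n < minL l then n else minL l := by
  obtain ⟨x, t, rfl⟩ := List.exists_cons_of_ne_nil hl
  simp [minL, PySem.List.min?_id_cons, List.foldl_append]
  rcases lt_or_ge n (t.foldl min x) with h | h
  · simp [min_eq_right (le_of_lt h), h]
  · simp [min_eq_left h, not_lt.mpr h]

lemma flt_append_singleton (space : Int) (l : List Int) (n r : Int) :
    flt space (l ++ [n]) r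
      = flt space l r ++ (if PySem.Int.mod n space = r then [n] else []) := by
  unfold flt
  rw [List.filter_append]
  congr 1
  by_cases h : PySem.Int.mod n space = r <;> simp [h]

lemma keyOf_append_singleton_of_ne (space : Int) (l : List Int) (n r : Int)
    (h : PySem.Int.mod n space ≠ r) :
    keyOf space (l ++ [n]) r = keyOf space l r := by
  unfold keyOf
  rw [flt_append_singleton, if_neg h, List.append_nil]

-- the invariant: A's dict after the loop holds exactly the remainders in first-occurrence
-- order, each carrying the (-count, min) key of its residue class
lemma dictA_items (space : Int) (l : List Int) :
    (l.foldl (stepA space) PySem.Dict.empty).items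
      = (occs space l).map (fun r => (r, keyOf space l r)) := by
  induction l using List.reverseRecOn with
  | nil => simp [occs, PySem.Dict.empty]
  | append_singleton l n ih =>
    rw [List.foldl_append, List.foldl_cons, List.foldl_nil]
    have hDmk : l.foldl (stepA space) PySem.Dict.empty
        = PySem.Dict.mk ((occs space l).map (fun r => (r, keyOf space l r))) :=
      PySem.Dict.ext ih
    rw [hDmk]
    set D := PySem.Dict.mk ((occs space l).map (fun r => (r, keyOf space l r))) with hD
    have hget : ∀ x, D.get? x = if x ∈ occs space l then some (keyOf space l x) else none :=
      get?_mk_map _ _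
    have hcont : ∀ x, D.contains x = decide (x ∈ occs space l) :=
      contains_mk_map _ _
    by_cases hmem : PySem.Int.mod n space ∈ occs space l
    · -- remainder already present: in-place update
      obtain ⟨m, hm, hmr⟩ := (occs_mem space l _).mp hmem
      have hfne : flt space l (PySem.Int.mod n space) ≠ [] := by
        have : m ∈ flt space l (PySem.Int.mod n space) := by
          unfold flt; rw [List.mem_filter]; exact ⟨hm, by simp [hmr]⟩
        exact List.ne_nil_of_mem this
      have hocc : occs space (l ++ [n]) = occs space l := by
        rw [occs_append_singleton]; unfold occStep; rw [if_pos hmem]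
      have hkey : (PySem.Int.mod n space, (keyOf space l (PySem.Int.mod n space)).1 - 1,
          if n < (keyOf space l (PySem.Int.mod n space)).2 then n
          else (keyOf space l (PySem.Int.mod n space)).2)
          = (PySem.Int.mod n space, keyOf space (l ++ [n]) (PySem.Int.mod n space)) := by
        have hflt : flt space (l ++ [n]) (PySem.Int.mod n space)
            = flt space l (PySem.Int.mod n space) ++ [n] := by
          rw [flt_append_singleton, if_pos rfl]
        unfold keyOf
        rw [hflt, minL_append_singleton _ hfne n, List.length_append, List.length_singleton]
        simp only [Prod.mk.injEq, and_true, true_and]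
        push_cast; ring
      unfold stepA
      rw [hget, if_pos hmem,
        PySem.Dict.items_insert_of_contains _ _ (by rw [hcont]; simp [hmem]), hD, hocc,
        List.map_map]
      apply List.map_congr_left
      intro r hr
      simp only [Function.comp_apply]
      by_cases hrr : r = PySem.Int.mod n space
      · rw [hrr, if_pos (by simp : ((PySem.Int.mod n space == PySem.Int.mod n space) = true))]
        exact hkey
      · rw [if_neg (by simp [hrr])]
        rw [keyOf_append_singleton_of_ne _ _ _ _ (fun h => hrr h.symm)]
    · -- fresh remainder: append (-1, n)
      have hflt0 : flt space l (PySem.Int.mod n space) = [] := by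
        unfold flt
        rw [List.filter_eq_nil_iff]
        intro m hm
        simp only [beq_iff_eq]
        exact fun h => hmem ((occs_mem space l _).mpr ⟨m, hm, h⟩)
      have hocc : occs space (l ++ [n]) = occs space l ++ [PySem.Int.mod n space] := by
        rw [occs_append_singleton]; unfold occStep; rw [if_neg hmem]
      unfold stepA
      rw [hget, if_neg hmem,
        PySem.Dict.items_insert_of_not_contains _ _ (by rw [hcont]; simp [hmem]), hD, hocc,
        List.map_append]
      congr 1
      · apply List.map_congr_left
        intro r hr
        have hrr : PySem.Int.mod n space ≠ r := fun h => hmem (h ▸ hr)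
        rw [keyOf_append_singleton_of_ne _ _ _ _ hrr]
      · have hkey0 : keyOf space (l ++ [n]) (PySem.Int.mod n space) = (-1, n) := by
          unfold keyOf
          rw [flt_append_singleton, hflt0, if_pos rfl, List.nil_append]
          norm_num [minL, PySem.List.min?_id_cons]
        rw [List.map_singleton, hkey0]

-- min2?'s fold step with fst/snd keys is exactly B's update (the decide-Bool test vs the lexicographic Prop test)
lemma foldl_step_eq {α β : Type} (f g : β → α → β) (h : ∀ acc x, f acc x = g acc x) :
    ∀ (xs : List α) (acc : β), xs.foldl f acc = xs.foldl g acc := by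
  intro xs
  induction xs with
  | nil => intro acc; rfl
  | cons x t ih => intro acc; rw [List.foldl_cons, List.foldl_cons, h, ih]

lemma min2?_eq_foldl_updB (xs : List (Int × Int)) :
    PySem.List.min2? xs (fun p => p.1) (fun p => p.2) = xs.foldl updB none := by
  unfold PySem.List.min2?
  apply foldl_step_eq
  intro acc x
  cases acc with
  | none => rfl
  | some m =>
    show (if _ = true then some x else some m) = (if _ then some x else some m)
    simp only [Bool.or_eq_true, Bool.and_eq_true, Bool.not_eq_true', decide_eq_true_eq,
      decide_eq_false_iff_not]
    split_ifs with h1 h2 <;> first | rfl | (exfalso; omega)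

def lexle (a b : Int × Int) : Prop := a.1 < b.1 ∨ (a.1 = b.1 ∧ a.2 ≤ b.2)

lemma lexle_refl (a : Int × Int) : lexle a a := Or.inr ⟨rfl, le_refl _⟩

lemma lexle_trans {a b c : Int × Int} (h1 : lexle a b) (h2 : lexle b c) : lexle a c := by
  unfold lexle at *; omega

lemma lexle_antisymm {a b : Int × Int} (h1 : lexle a b) (h2 : lexle b a) : a = b := by
  unfold lexle at *
  have : a.1 = b.1 ∧ a.2 = b.2 := by omega
  exact Prod.ext this.1 this.2

lemma lexle_of_not_lt {a b : Int × Int} (h : ¬(a.1 < b.1 ∨ (a.1 = b.1 ∧ a.2 < b.2))) : lexle b a := by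
  unfold lexle; omega

lemma lexle_of_lt {a b : Int × Int} (h : a.1 < b.1 ∨ (a.1 = b.1 ∧ a.2 < b.2)) : lexle a b := by
  unfold lexle; omega

-- the running minimum returns a member that is lexicographically ≤ everything seen
lemma foldl_updB_char (xs : List (Int × Int)) (m0 : Int × Int) :
    ∃ m, xs.foldl updB (some m0) = some m ∧ (m = m0 ∨ m ∈ xs) ∧ lexle m m0 ∧ ∀ x ∈ xs, lexle m x := by
  induction xs generalizing m0 with
  | nil => exact ⟨m0, rfl, Or.inl rfl, lexle_refl m0, by simp⟩
  | cons x t ih =>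
    rw [List.foldl_cons]
    have hstep : updB (some m0) x
        = if x.1 < m0.1 ∨ (x.1 = m0.1 ∧ x.2 < m0.2) then some x else some m0 := rfl
    rw [hstep]
    by_cases hc : x.1 < m0.1 ∨ (x.1 = m0.1 ∧ x.2 < m0.2)
    · rw [if_pos hc]
      obtain ⟨m, h1, h2, h3, h4⟩ := ih x
      refine ⟨m, h1, Or.inr ?_, lexle_trans h3 (lexle_of_lt hc), ?_⟩
      · rcases h2 with rfl | h2
        · exact List.mem_cons_self ..
        · exact List.mem_cons_of_mem _ h2
      · intro y hy
        rcases List.mem_cons.mp hy with rfl | hy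
        · exact h3
        · exact h4 y hy
    · rw [if_neg hc]
      obtain ⟨m, h1, h2, h3, h4⟩ := ih m0
      refine ⟨m, h1, ?_, h3, ?_⟩
      · rcases h2 with rfl | h2
        · exact Or.inl rfl
        · exact Or.inr (List.mem_cons_of_mem _ h2)
      · intro y hy
        rcases List.mem_cons.mp hy with rfl | hy
        · exact lexle_trans h3 (lexle_of_not_lt hc)
        · exact h4 y hy

lemma foldl_updB_ne_nil (xs : List (Int × Int)) (h : xs ≠ []) :
    ∃ m, xs.foldl updB none = some m ∧ m ∈ xs ∧ ∀ x ∈ xs, lexle m x := by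
  obtain ⟨a, t, rfl⟩ := List.exists_cons_of_ne_nil h
  rw [List.foldl_cons]
  obtain ⟨m, h1, h2, h3, h4⟩ := foldl_updB_char t a
  refine ⟨m, h1, ?_, ?_⟩
  · rcases h2 with rfl | h2
    · exact List.mem_cons_self ..
    · exact List.mem_cons_of_mem _ h2
  · intro y hy
    rcases List.mem_cons.mp hy with rfl | hy
    · exact h3
    · exact h4 y hy

lemma clsKey_eq (nums : List Int) (space : Int) (n : Int) :
    clsKey nums space n = keyOf space nums (PySem.Int.mod n space) := rfl

-- ===== VERDICT (by name: the statement is the Claim_ definition above) =====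
theorem solution_1704_4_spec : Claim_equal_solution_1704_4 := by
  intro nums space _ pre
  obtain ⟨hne, -⟩ := pre
  show solution_1704_4 nums space = solution_1704_4_alt nums space
  -- A's side: the minimum over the per-remainder keys, in first-occurrence order
  have hvals : (nums.foldl (stepA space) PySem.Dict.empty).values
      = (occs space nums).map (keyOf space nums) := by
    show ((nums.foldl (stepA space) PySem.Dict.empty).items).map (fun p => p.2)
        = (occs space nums).map (keyOf space nums)
    rw [dictA_items, List.map_map]
    rfl
  obtain ⟨n0, t0, hcons⟩ := List.exists_cons_of_ne_nil hne
  have hKAne : (occs space nums).map (keyOf space nums) ≠ [] := by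
    have : PySem.Int.mod n0 space ∈ occs space nums :=
      (occs_mem space nums _).mpr ⟨n0, by simp [hcons], rfl⟩
    exact List.ne_nil_of_mem (List.mem_map_of_mem this)
  obtain ⟨mA, hA1, hA2, hA3⟩ := foldl_updB_ne_nil _ hKAne
  -- B's side: the minimum over one key per element
  have hfoldB : nums.foldl (fun b n => updB b (clsKey nums space n)) none
      = (nums.map (fun n => clsKey nums space n)).foldl updB none := by
    rw [List.foldl_map]
  have hKBne : nums.map (fun n => clsKey nums space n) ≠ [] := by simp [hcons]
  obtain ⟨mB, hB1, hB2, hB3⟩ := foldl_updB_ne_nil _ hKBne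
  -- the two key lists have the same members, so the two lexicographic minima coincide
  have hAB : mA ∈ nums.map (fun n => clsKey nums space n) := by
    obtain ⟨r, hr, hkr⟩ := List.mem_map.mp hA2
    obtain ⟨m, hm, hmr⟩ := (occs_mem space nums r).mp hr
    exact List.mem_map.mpr ⟨m, hm, by rw [clsKey_eq, hmr, hkr]⟩
  have hBA : mB ∈ (occs space nums).map (keyOf space nums) := by
    obtain ⟨m, hm, hkm⟩ := List.mem_map.mp hB2
    rw [← hkm, clsKey_eq]
    exact List.mem_map_of_mem ((occs_mem space nums _).mpr ⟨m, hm, rfl⟩)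
  have heq : mA = mB := lexle_antisymm (hA3 mB hBA) (hB3 mA hAB)
  -- evaluate both matches
  show (match PySem.List.min2? (nums.foldl (stepA space) PySem.Dict.empty).values
          (fun p => p.1) (fun p => p.2) with
        | some p => p.2
        | none => 0)
      = (match nums.foldl (fun b n => updB b (clsKey nums space n)) none with
        | some b => b.2
        | none => 0)
  rw [hvals, min2?_eq_foldl_updB, hA1, hfoldB, hB1, heq]
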